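-- pv_equiv track=rewrite | github.com/gridvisi/Python_workspace | brilliant/loop and slice/air-tickets-reservation-program.py | books
-- ===== SOURCE A (Python) =====
-- def books(booked,seatsTrans):
--     row = ['A', 'B', 'C', 'D', 'E', 'F']
--     rowDict = dict(zip(range(len(row) + 1), row))
--     colKey = [i for i in range(13)]
--     colsDict = dict(zip(colKey, [i + 2 if i >= 12 else i for i in range(2, 16)]))
--
--     for row in range(len(row)):
--         # alphaZip[row]=A->F
--         for col in colKey:
--             if seatsTrans[row][col] != 0:
--                 booked -= 1
--                 if booked == 0:
--                     return rowDict[row],colsDict[col]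
-- ===== SOURCE B (Python) =====
-- def books(booked, seatsTrans):
--     # Block-skip: count each row's booked seats, subtract whole rows until the
--     # target row is reached, then scan only that row for the residual k-th seat.
--     rows = ['A', 'B', 'C', 'D', 'E', 'F']
--     k = booked
--     for r in range(6):
--         cnt = sum(1 for v in seatsTrans[r][:13] if v != 0)
--         if 1 <= k <= cnt:
--             row = seatsTrans[r]
--             c = -1
--             while k > 0:
--                 c += 1
--                 if row[c] != 0:
--                     k -= 1
--             return rows[r], c + 2 if c < 10 else c + 4
--         k -= cnt
-- ===== Notes on version B (the rewrite author's own statement) =====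
-- stated objective: alternative
-- what changed: Replaces A's cell-by-cell row-major scan with a mutable countdown and early return by block skipping: count each row's booked seats via a per-row pass, subtract whole-row counts to select the target row, then scan only that row for the residual k-th occupied seat.
import Mathlib
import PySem

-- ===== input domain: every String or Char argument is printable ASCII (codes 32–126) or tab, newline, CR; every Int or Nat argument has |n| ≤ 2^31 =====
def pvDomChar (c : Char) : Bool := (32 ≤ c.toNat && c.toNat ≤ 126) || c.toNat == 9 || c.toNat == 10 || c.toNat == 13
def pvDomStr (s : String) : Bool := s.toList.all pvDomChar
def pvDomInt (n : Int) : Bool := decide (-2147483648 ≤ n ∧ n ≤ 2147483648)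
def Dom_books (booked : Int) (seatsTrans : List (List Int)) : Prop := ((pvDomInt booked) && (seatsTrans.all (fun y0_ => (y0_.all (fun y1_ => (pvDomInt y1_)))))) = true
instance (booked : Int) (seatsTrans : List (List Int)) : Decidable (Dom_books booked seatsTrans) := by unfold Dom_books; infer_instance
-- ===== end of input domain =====

-- B replaces A's cell-by-cell row-major scan with a global countdown by block skipping:
-- count each row's booked seats, subtract whole rows, then scan only the selected row (objective: alternative).

-- ===== PORT A =====
-- rowDict = dict(zip(range(len(row) + 1), row))
def pvRowDictA : PySem.Dict Int String :=
  PySem.Dict.ofList (List.zip (PySem.List.pyRange 0 7 1) ["A", "B", "C", "D", "E", "F"])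
-- colsDict = dict(zip(colKey, [i + 2 if i >= 12 else i for i in range(2, 16)]))
def pvColsDictA : PySem.Dict Int Int :=
  PySem.Dict.ofList (List.zip (PySem.List.pyRange 0 13 1)
    ((PySem.List.pyRange 2 16 1).map (fun i => if 12 ≤ i then i + 2 else i)))

-- inner 'for col in colKey' loop; Sum.inl = the function returns (early return; IndexError
-- is encoded as Sum.inl none, those inputs are outside Pre_), Sum.inr = loop done, counter carried
def booksInner (seatsTrans : List (List Int)) (rowDict : PySem.Dict Int String)
    (colsDict : PySem.Dict Int Int) (r : Int) : List Int → Int → (Option (String × Int)) ⊕ Int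
  | [], booked => Sum.inr booked
  | c :: cs, booked =>
    match (PySem.List.pyGet? seatsTrans r).bind (fun rw => PySem.List.pyGet? rw c) with
    | none => Sum.inl none    -- IndexError in Python; excluded by Pre_books
    | some v =>
      if v ≠ 0 then
        if booked - 1 = 0 then
          -- rowDict[row], colsDict[col]: keys 0..5 / 0..12 are always present, so getD is exact here
          Sum.inl (some (rowDict.getD r "", colsDict.getD c 0))
        else booksInner seatsTrans rowDict colsDict r cs (booked - 1)
      else booksInner seatsTrans rowDict colsDict r cs booked

-- outer 'for row in range(len(row))' loop
def booksOuter (seatsTrans : List (List Int)) (rowDict : PySem.Dict Int String)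
    (colsDict : PySem.Dict Int Int) : List Int → Int → Option (String × Int)
  | [], _ => none
  | r :: rs, booked =>
    match booksInner seatsTrans rowDict colsDict r (PySem.List.pyRange 0 13 1) booked with
    | Sum.inl res => res
    | Sum.inr b' => booksOuter seatsTrans rowDict colsDict rs b'

def books (booked : Int) (seatsTrans : List (List Int)) : Option (String × Int) :=
  booksOuter seatsTrans pvRowDictA pvColsDictA (PySem.List.pyRange 0 6 1) booked

-- ===== PORT B =====
-- per-row count: sum(1 for v in seatsTrans[r][:13] if v != 0)
def cntB (row : List Int) : Int :=
  (((PySem.List.slice row none (some 13)).countP (fun v => v ≠ 0) : Nat) : Int)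

-- 'c = -1; while k > 0: c += 1; if row[c] != 0: k -= 1', recursing over the row
-- (none = Python's row[c] IndexError; unreachable under the guard 1 <= k <= cnt)
def findColB : List Int → Int → Int → Option Int
  | [], _, _ => none
  | v :: vs, k, c =>
    let k' := if v ≠ 0 then k - 1 else k
    if k' = 0 then some c else findColB vs k' (c + 1)

-- 'for r in range(6): …', recursing over the row indices; k carried like Python's k
def walkB (seatsTrans : List (List Int)) : List Int → Int → Option (String × Int)
  | [], _ => none
  | r :: rs, k =>
    match PySem.List.pyGet? seatsTrans r with
    | none => none      -- seatsTrans[r]: IndexError in Python; excluded by Pre_books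
    | some row =>
      if 1 ≤ k ∧ k ≤ cntB row then
        (findColB row k 0).map (fun c =>
          ((PySem.List.pyGet? ["A", "B", "C", "D", "E", "F"] r).getD "",
           if c < 10 then c + 2 else c + 4))
      else walkB seatsTrans rs (k - cntB row)

def books_alt (booked : Int) (seatsTrans : List (List Int)) : Option (String × Int) :=
  walkB seatsTrans (PySem.List.pyRange 0 6 1) booked

-- ===== PRECONDITION & SPEC =====
-- length of row r of the grid (0 for a missing row)
def rowLenB (seatsTrans : List (List Int)) (r : Int) : Nat :=
  ((PySem.List.pyGet? seatsTrans r).getD []).length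
-- row r exists and has the full 13 columns
def rowOKb (seatsTrans : List (List Int)) (r : Int) : Bool :=
  decide (13 ≤ rowLenB seatsTrans r)
-- the rows A's scan visits before raising: the full leading rows plus the first deficient one
def scannedRows (seatsTrans : List (List Int)) : List Int :=
  (PySem.List.pyRange 0 6 1).takeWhile (rowOKb seatsTrans)
    ++ ((PySem.List.pyRange 0 6 1).dropWhile (rowOKb seatsTrans)).take 1
-- number of occupied seats among the cells A scans before the first missing cell
def preN (seatsTrans : List (List Int)) : Int :=
  ((scannedRows seatsTrans).map
    (fun r => (((((PySem.List.pyGet? seatsTrans r).getD []).take 13).countP (fun v => v ≠ 0) : Nat) : Int))).sum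

-- Exactly A's return domain: A returns normally iff the grid has a full 6×13 prefix, or the
-- booked-th occupied seat occurs among the cells scanned before the first missing cell (early return).
def Pre_books (booked : Int) (seatsTrans : List (List Int)) : Prop :=
  (∀ r ∈ PySem.List.pyRange 0 6 1, rowOKb seatsTrans r = true)
  ∨ (1 ≤ booked ∧ booked ≤ preN seatsTrans)
instance (booked : Int) (seatsTrans : List (List Int)) : Decidable (Pre_books booked seatsTrans) := by
  unfold Pre_books; infer_instance

def pvWitness_books : Int × List (List Int) :=
  (2, [[1, 0, 0, 0, 0, 0, 0, 0, 0, 0, 0, 0, 1],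
       [0, 0, 0, 0, 0, 0, 0, 0, 0, 0, 0, 0, 0],
       [0, 1, 0, 0, 0, 0, 0, 0, 0, 0, 0, 0, 0],
       [0, 0, 0, 0, 0, 0, 0, 0, 0, 0, 0, 0, 0],
       [0, 0, 0, 0, 0, 0, 0, 0, 0, 0, 0, 0, 0],
       [0, 0, 0, 0, 0, 0, 0, 0, 0, 0, 0, 1, 0]])

def Spec_books (booked : Int) (seatsTrans : List (List Int)) (out : Option (String × Int)) : Prop := out = books_alt booked seatsTrans
instance (booked : Int) (seatsTrans : List (List Int)) (out : Option (String × Int)) : Decidable (Spec_books booked seatsTrans out) := by unfold Spec_books; infer_instance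

-- ===== CLAIM (what is proved, stated in full; the proofs are below) =====
def Claim_equal_books : Prop := ∀ (booked : Int) (seatsTrans : List (List Int)), Dom_books booked seatsTrans → Pre_books booked seatsTrans → Spec_books booked seatsTrans (books booked seatsTrans)

-- ===== LEMMAS AND PROOFS =====

-- what A's inner loop does at one cell (none = skipped or unreachable)
def cellA (seatsTrans : List (List Int)) (r c : Int) : Option (String × Int) :=
  match (PySem.List.pyGet? seatsTrans r).bind (fun rw => PySem.List.pyGet? rw c) with
  | some v => if v ≠ 0 then some (pvRowDictA.getD r "", pvColsDictA.getD c 0) else none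
  | none => none

-- the seats A's scan would collect in row r (over the full column range; invalid cells skip)
def hA (seatsTrans : List (List Int)) (r : Int) : List (String × Int) :=
  (PySem.List.pyRange 0 13 1).filterMap (cellA seatsTrans r)

-- B-side abstractions (proof-only): the seat built from row index r and column index c
def pairF (r c : Int) : String × Int :=
  ((PySem.List.pyGet? ["A", "B", "C", "D", "E", "F"] r).getD "", if c < 10 then c + 2 else c + 4)
-- column indices of the occupied cells of a row prefix
def hitsIdx (l : List Int) : List Int :=
  (PySem.List.enumerate l 0).filterMap (fun p => if p.2 ≠ 0 then some p.1 else none)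
-- the seats of grid row `row` carrying absolute row index r
def hB (r : Int) (row : List Int) : List (String × Int) :=
  (hitsIdx (row.take 13)).map (pairF r)

theorem access_isSome (seatsTrans : List (List Int)) (r c : Int) (hc : 0 ≤ c) :
    ((PySem.List.pyGet? seatsTrans r).bind (fun rw => PySem.List.pyGet? rw c)).isSome
      ↔ c < (rowLenB seatsTrans r : Int) := by
  cases h : PySem.List.pyGet? seatsTrans r with
  | none => simp [rowLenB, h]; omega
  | some rowv =>
    simp [rowLenB, h, PySem.List.pyGet?_of_nonneg _ hc]
    omega

theorem access_none (seatsTrans : List (List Int)) (r c : Int) (hc : 0 ≤ c)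
    (h : (rowLenB seatsTrans r : Int) ≤ c) :
    ((PySem.List.pyGet? seatsTrans r).bind (fun rw => PySem.List.pyGet? rw c)) = none := by
  cases hx : (PySem.List.pyGet? seatsTrans r).bind (fun rw => PySem.List.pyGet? rw c) with
  | none => rfl
  | some v =>
    exfalso
    have := (access_isSome seatsTrans r c hc).mp (by rw [hx]; rfl)
    omega

theorem sum_map_intCast {α : Type} (f : α → Nat) (l : List α) :
    (l.map (fun a => ((f a : Nat) : Int))).sum = (((l.map f).sum : Nat) : Int) := by
  induction l with
  | nil => rfl
  | cons a l ih => simp [ih]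

theorem pyGet?_pos_shift {α : Type} (x : α) (xs : List α) (i : Int) (h : 1 ≤ i) :
    PySem.List.pyGet? (x :: xs) i = PySem.List.pyGet? xs (i - 1) := by
  rw [PySem.List.pyGet?_of_nonneg _ (by omega : (0:Int) ≤ i),
      PySem.List.pyGet?_of_nonneg _ (by omega : (0:Int) ≤ i - 1)]
  have hn : i.toNat = (i - 1).toNat + 1 := by omega
  rw [hn, List.getElem?_cons_succ]

theorem pyGet?_append_skip {α : Type} (xs ys : List α) (i : Int) (h : (xs.length : Int) ≤ i) :
    PySem.List.pyGet? (xs ++ ys) i = PySem.List.pyGet? ys (i - xs.length) := by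
  rw [PySem.List.pyGet?_of_nonneg _ (by omega : (0:Int) ≤ i),
      PySem.List.pyGet?_of_nonneg _ (by omega : (0:Int) ≤ i - xs.length)]
  rw [List.getElem?_append_right (by omega : xs.length ≤ i.toNat)]
  congr 1
  omega

theorem pyGet?_append_keep {α : Type} (xs ys : List α) (i : Int) (h0 : 0 ≤ i)
    (h : i < (xs.length : Int)) :
    PySem.List.pyGet? (xs ++ ys) i = PySem.List.pyGet? xs i := by
  rw [PySem.List.pyGet?_of_nonneg _ h0, PySem.List.pyGet?_of_nonneg _ h0]
  rw [List.getElem?_append_left (by omega : i.toNat < xs.length)]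

theorem pyGet?_map {α β : Type} (f : α → β) (l : List α) (i : Int) (h0 : 0 ≤ i) :
    PySem.List.pyGet? (l.map f) i = (PySem.List.pyGet? l i).map f := by
  rw [PySem.List.pyGet?_of_nonneg _ h0, PySem.List.pyGet?_of_nonneg _ h0]
  simp

theorem inner2 (seatsTrans : List (List Int)) (r : Int) :
    ∀ (n : Nat) (a : Int), a + n = 13 → 0 ≤ a → a ≤ (rowLenB seatsTrans r : Int) →
    ∀ booked, booksInner seatsTrans pvRowDictA pvColsDictA r (PySem.List.pyRange a 13 1) booked =
      (if 1 ≤ booked ∧ booked ≤ (((PySem.List.pyRange a 13 1).filterMap (cellA seatsTrans r)).length : Int)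
       then Sum.inl (PySem.List.pyGet? ((PySem.List.pyRange a 13 1).filterMap (cellA seatsTrans r)) (booked - 1))
       else if rowOKb seatsTrans r then
         Sum.inr (booked - ((PySem.List.pyRange a 13 1).filterMap (cellA seatsTrans r)).length)
       else Sum.inl none) := by
  intro n
  induction n with
  | zero =>
    intro a ha h0 hlen booked
    have ha13 : a = 13 := by omega
    subst ha13
    rw [PySem.List.pyRange_one_eq_nil (le_refl _)]
    simp only [booksInner, List.filterMap_nil, List.length_nil]
    rw [if_neg (by omega), if_pos (by simp [rowOKb]; omega)]
    norm_num
  | succ n ih =>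
    intro a ha h0 hlen booked
    have halt : a < 13 := by omega
    rw [PySem.List.pyRange_one_cons (by omega : a < 13)]
    cases hacc : (PySem.List.pyGet? seatsTrans r).bind (fun rw => PySem.List.pyGet? rw a) with
    | none =>
      have haL : (rowLenB seatsTrans r : Int) = a := by
        by_contra hne
        have hlt : a < (rowLenB seatsTrans r : Int) := by omega
        have := (access_isSome seatsTrans r a h0).mpr hlt
        rw [hacc] at this
        simp at this
      have hnil : (a :: PySem.List.pyRange (a + 1) 13 1).filterMap (cellA seatsTrans r) = [] := by
        rw [List.filterMap_eq_nil_iff]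
        intro c hc
        have hc' : a ≤ c := by
          rcases List.mem_cons.mp hc with h | h
          · omega
          · have := (PySem.List.mem_pyRange_one).mp h; omega
        have h0c : 0 ≤ c := by omega
        unfold cellA
        rw [access_none seatsTrans r c h0c (by omega)]
      simp only [booksInner, hacc]
      rw [hnil]
      simp only [List.length_nil]
      rw [if_neg (by omega), if_neg (by simp [rowOKb]; omega)]
    | some v =>
      have hvalid : a < (rowLenB seatsTrans r : Int) := by
        have := (access_isSome seatsTrans r a h0).mp (by rw [hacc]; rfl)
        omega
      have hcell : cellA seatsTrans r a =
          (if v ≠ 0 then some (pvRowDictA.getD r "", pvColsDictA.getD a 0) else none) := by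
        unfold cellA; rw [hacc]
      by_cases hv0 : v = 0
      · have hskip : (a :: PySem.List.pyRange (a + 1) 13 1).filterMap (cellA seatsTrans r) =
            (PySem.List.pyRange (a + 1) 13 1).filterMap (cellA seatsTrans r) := by
          rw [List.filterMap_cons, hcell]
          simp [hv0]
        rw [hskip]
        simp only [booksInner, hacc, hv0]
        simpa using ih (a + 1) (by omega) (by omega) (by omega) booked
      · have hcons : (a :: PySem.List.pyRange (a + 1) 13 1).filterMap (cellA seatsTrans r) =
            (pvRowDictA.getD r "", pvColsDictA.getD a 0) ::
              (PySem.List.pyRange (a + 1) 13 1).filterMap (cellA seatsTrans r) := by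
          rw [List.filterMap_cons, hcell]
          simp [hv0]
        rw [hcons]
        simp only [List.length_cons]
        by_cases hb : booked - 1 = 0
        · have hbk : booked = 1 := by omega
          subst hbk
          simp only [booksInner, hacc, if_pos hv0]
          rw [if_pos (show (1:Int) - 1 = 0 by norm_num), if_pos (by omega)]
          norm_num [PySem.List.pyGet?_zero_cons]
        · simp only [booksInner, hacc, if_pos hv0, if_neg hb]
          rw [ih (a + 1) (by omega) (by omega) (by omega) (booked - 1)]
          split_ifs with h1 h2 h3 h4 h5 h6
          · rw [pyGet?_pos_shift _ _ _ (by omega)]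
          · exact absurd ⟨by omega, by omega⟩ h2
          · exfalso; exact h2 ⟨by omega, by omega⟩
          · exact absurd ⟨by omega, by omega⟩ h1
          · congr 1; omega
          · exfalso; exact h1 ⟨by omega, by omega⟩
          · rfl

theorem inner2_zero (seatsTrans : List (List Int)) (r : Int) (booked : Int) :
    booksInner seatsTrans pvRowDictA pvColsDictA r (PySem.List.pyRange 0 13 1) booked =
      (if 1 ≤ booked ∧ booked ≤ ((hA seatsTrans r).length : Int)
       then Sum.inl (PySem.List.pyGet? (hA seatsTrans r) (booked - 1))
       else if rowOKb seatsTrans r then Sum.inr (booked - (hA seatsTrans r).length)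
       else Sum.inl none) :=
  inner2 seatsTrans r 13 0 (by norm_num) (le_refl _) (by positivity) booked

theorem outer2 (seatsTrans : List (List Int)) :
    ∀ (rows : List Int) (booked : Int),
    booksOuter seatsTrans pvRowDictA pvColsDictA rows booked =
      (if 1 ≤ booked ∧ booked ≤
          (((rows.takeWhile (rowOKb seatsTrans)
             ++ (rows.dropWhile (rowOKb seatsTrans)).take 1).flatMap (hA seatsTrans)).length : Int)
       then PySem.List.pyGet?
          ((rows.takeWhile (rowOKb seatsTrans)
            ++ (rows.dropWhile (rowOKb seatsTrans)).take 1).flatMap (hA seatsTrans)) (booked - 1)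
       else none) := by
  intro rows
  induction rows with
  | nil =>
    intro booked
    simp only [booksOuter, List.takeWhile_nil, List.dropWhile_nil, List.take_nil,
      List.nil_append, List.flatMap_nil, List.length_nil]
    rw [if_neg (by omega)]
  | cons r rs ih =>
    intro booked
    simp only [booksOuter]
    rw [inner2_zero seatsTrans r booked]
    by_cases hok : rowOKb seatsTrans r = true
    · rw [List.takeWhile_cons_of_pos hok, List.dropWhile_cons_of_pos hok]
      simp only [List.cons_append, List.flatMap_cons]
      by_cases hg : 1 ≤ booked ∧ booked ≤ ((hA seatsTrans r).length : Int)
      · rw [if_pos hg]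
        dsimp only
        obtain ⟨hg1, hg2⟩ := hg
        rw [if_pos (by simp only [List.length_append]; push_cast at hg2 ⊢; omega)]
        exact (pyGet?_append_keep _ _ _ (by omega) (by omega)).symm
      · rw [if_neg hg, if_pos hok]
        dsimp only
        rw [ih (booked - (hA seatsTrans r).length)]
        simp only [List.length_append]
        split_ifs with hA1 hB1 hB1
        · obtain ⟨hx, hy⟩ := hA1
          rw [pyGet?_append_skip _ _ _ (by omega)]
          congr 1
          omega
        · obtain ⟨hx, hy⟩ := hA1
          exact absurd ⟨by omega, by push_cast at hy ⊢; omega⟩ hB1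
        · exfalso
          obtain ⟨hx, hy⟩ := hB1
          by_cases hle : booked ≤ ((hA seatsTrans r).length : Int)
          · exact hg ⟨hx, hle⟩
          · exact hA1 ⟨by omega, by push_cast at hy ⊢; omega⟩
        · rfl
    · rw [List.takeWhile_cons_of_neg (by simpa using hok), List.dropWhile_cons_of_neg (by simpa using hok)]
      simp only [List.nil_append, List.take_succ_cons, List.take_zero, List.flatMap_cons,
        List.flatMap_nil, List.append_nil]
      by_cases hg : 1 ≤ booked ∧ booked ≤ ((hA seatsTrans r).length : Int)
      · rw [if_pos hg, if_pos hg]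
      · rw [if_neg hg, if_neg hok, if_neg hg]

-- the concrete seat-label pairs agree cell by cell on the 6×13 grid
theorem pair_key : ∀ r ∈ PySem.List.pyRange 0 6 1, ∀ c ∈ PySem.List.pyRange 0 13 1,
    (pvRowDictA.getD r "", pvColsDictA.getD c 0) = pairF r c := by
  decide

theorem hA_nil (seatsTrans : List (List Int)) (r : Int)
    (hrow : PySem.List.pyGet? seatsTrans r = none) : hA seatsTrans r = [] := by
  unfold hA
  rw [List.filterMap_eq_nil_iff]
  intro c _
  unfold cellA
  rw [hrow]
  rfl

-- fusing the per-cell guard with the seat constructor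
theorem fuse_filterMap {α : Type} (f : Int → α) (l : List (Int × Int)) :
    l.filterMap (fun p => if p.2 ≠ 0 then some (f p.1) else none)
      = (l.filterMap (fun p => if p.2 ≠ 0 then some p.1 else none)).map f := by
  induction l with
  | nil => rfl
  | cons p l ih =>
    simp only [List.filterMap_cons, ih]
    by_cases h : p.2 = 0 <;> simp [h]

-- B's per-row seat list equals A's per-row hit list
theorem hA_eq_hB (seatsTrans : List (List Int)) (r : Int) (hr0 : 0 ≤ r) (hr6 : r < 6) :
    hB r (((PySem.List.pyGet? seatsTrans r).getD [])) = hA seatsTrans r := by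
  have hrm : r ∈ PySem.List.pyRange 0 6 1 := PySem.List.mem_pyRange_one.mpr ⟨hr0, hr6⟩
  rw [hB, hitsIdx, ← fuse_filterMap (pairF r)]
  cases hrow : PySem.List.pyGet? seatsTrans r with
  | none =>
    rw [hA_nil seatsTrans r hrow]
    rfl
  | some rowv =>
    simp only [Option.getD_some]
    rw [PySem.List.enumerate_eq_map_pyRange (rowv.take 13) 0, List.filterMap_map]
    have hm13 : ((min 13 rowv.length : Nat) : Int) ≤ 13 := by omega
    have hm0 : (0 : Int) ≤ ((min 13 rowv.length : Nat) : Int) := by omega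
    unfold hA
    rw [PySem.List.pyRange_one_append 0 ((min 13 rowv.length : Nat) : Int) 13 hm0 hm13,
        List.filterMap_append]
    have hlen : PySem.List.len (rowv.take 13) = ((min 13 rowv.length : Nat) : Int) := by
      simp [PySem.List.len]
    rw [hlen]
    have htail : (PySem.List.pyRange ((min 13 rowv.length : Nat) : Int) 13 1).filterMap
        (cellA seatsTrans r) = [] := by
      rw [List.filterMap_eq_nil_iff]
      intro c hc
      have hcb := PySem.List.mem_pyRange_one.mp hc
      unfold cellA
      rw [access_none seatsTrans r c (by omega)
        (by simp only [rowLenB, hrow, Option.getD_some]; omega)]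
    rw [htail, List.append_nil]
    apply List.filterMap_congr
    intro c hc
    have hcb := PySem.List.mem_pyRange_one.mp hc
    have hcL : c < (rowv.length : Int) := by omega
    have hc13 : c < 13 := by omega
    have hcm : c ∈ PySem.List.pyRange 0 13 1 := PySem.List.mem_pyRange_one.mpr ⟨by omega, hc13⟩
    have hget : PySem.List.pyGetD (rowv.take 13) c 0 = rowv[c.toNat] := by
      rw [PySem.List.pyGetD_eq_getElem _ _ (by omega) (by simp; omega)]
      exact List.getElem_take
    have hacc : (PySem.List.pyGet? seatsTrans r).bind (fun rw => PySem.List.pyGet? rw c)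
        = some rowv[c.toNat] := by
      rw [hrow]
      simp only [Option.bind_some]
      rw [PySem.List.pyGet?_of_nonneg _ (by omega : (0:Int) ≤ c),
          List.getElem?_eq_getElem (by omega : c.toNat < rowv.length)]
    unfold cellA
    rw [hacc]
    dsimp only [Function.comp]
    simp only [hget]
    by_cases hv : rowv[c.toNat] = 0
    · simp [hv]
    · simp only [ne_eq, hv, not_false_eq_true, if_pos]
      rw [← pair_key r hrm c hcm]

theorem length_filterMap_guard' {α β : Type} (p : α → Prop) [DecidablePred p] (f : α → β)
    (l : List α) :
    (l.filterMap (fun a => if p a then some (f a) else none)).length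
      = l.countP (fun a => decide (p a)) := by
  induction l with
  | nil => rfl
  | cons a l ih =>
    by_cases h : p a <;> simp [h, ih]

theorem length_hitsIdx (l : List Int) :
    (hitsIdx l).length = l.countP (fun v => v ≠ 0) := by
  rw [hitsIdx, length_filterMap_guard' (fun p : Int × Int => p.2 ≠ 0) Prod.fst]
  conv_rhs => rw [← PySem.List.map_snd_enumerate l 0, List.countP_map]
  rfl

theorem cntB_eq (row : List Int) :
    cntB row = (((row.take 13).countP (fun v => v ≠ 0) : Nat) : Int) := by
  rw [cntB, PySem.List.slice_to] <;> simp

theorem countP_ne_cons (v : Int) (vs : List Int) :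
    (v :: vs).countP (fun x => x ≠ 0)
      = vs.countP (fun x => x ≠ 0) + (if v = 0 then 0 else 1) := by
  rw [List.countP_cons]
  by_cases h : v = 0 <;> simp [h]

-- B's in-row scan only looks at a prefix holding k occupied cells
theorem findCol_prefix : ∀ (l1 : List Int) (l2 : List Int) (k s : Int), 1 ≤ k →
    k ≤ ((l1.countP (fun v => v ≠ 0) : Nat) : Int) →
    findColB (l1 ++ l2) k s = findColB l1 k s := by
  intro l1
  induction l1 with
  | nil => intro l2 k s h1 h2; simp at h2; omega
  | cons v vs ih =>
    intro l2 k s h1 h2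
    rw [countP_ne_cons] at h2
    simp only [List.cons_append, findColB]
    by_cases hv : v = 0
    · simp only [hv, ne_eq, not_true_eq_false, if_false]
      rw [if_neg (by omega), if_neg (by omega)]
      exact ih l2 k (s + 1) h1 (by simp [hv] at h2; simp only [ne_eq, decide_not]; push_cast at h2 ⊢; omega)
    · simp only [ne_eq, hv, not_false_eq_true, if_true]
      by_cases hk : k - 1 = 0
      · rw [if_pos hk, if_pos hk]
      · rw [if_neg hk, if_neg hk]
        exact ih l2 (k - 1) (s + 1) (by omega)
          (by simp [hv] at h2; simp only [ne_eq, decide_not]; push_cast at h2 ⊢; omega)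

-- B's in-row scan finds the k-th occupied column index
theorem findCol_spec : ∀ (l : List Int) (k s : Int), 1 ≤ k →
    k ≤ ((l.countP (fun v => v ≠ 0) : Nat) : Int) →
    findColB l k s = PySem.List.pyGet?
      ((PySem.List.enumerate l s).filterMap (fun p => if p.2 ≠ 0 then some p.1 else none)) (k - 1) := by
  intro l
  induction l with
  | nil => intro k s h1 h2; simp at h2; omega
  | cons v vs ih =>
    intro k s h1 h2
    rw [countP_ne_cons] at h2
    rw [PySem.List.enumerate_cons]
    simp only [findColB, List.filterMap_cons]
    by_cases hv : v = 0
    · simp only [hv, ne_eq, not_true_eq_false, if_false]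
      rw [if_neg (by omega)]
      exact ih k (s + 1) h1 (by simp [hv] at h2; simp only [ne_eq, decide_not]; push_cast at h2 ⊢; omega)
    · simp only [ne_eq, hv, not_false_eq_true, if_true]
      by_cases hk : k - 1 = 0
      · rw [if_pos hk]
        have : k = 1 := by omega
        subst this
        norm_num [PySem.List.pyGet?_zero_cons]
      · rw [if_neg hk]
        rw [ih (k - 1) (s + 1) (by omega)
          (by simp [hv] at h2; simp only [ne_eq, decide_not]; push_cast at h2 ⊢; omega)]
        rw [pyGet?_pos_shift _ _ _ (by omega)]

theorem scanned_subset (seatsTrans : List (List Int)) :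
    ∀ r ∈ scannedRows seatsTrans, r ∈ PySem.List.pyRange 0 6 1 := by
  intro r hr
  unfold scannedRows at hr
  rcases List.mem_append.mp hr with h | h
  · exact (List.takeWhile_sublist _).mem h
  · exact (List.dropWhile_sublist _).mem ((List.take_sublist _ _).mem h)

theorem length_hA (seatsTrans : List (List Int)) (r : Int) (hr0 : 0 ≤ r) (hr6 : r < 6) :
    (hA seatsTrans r).length
      = (((PySem.List.pyGet? seatsTrans r).getD []).take 13).countP (fun v => v ≠ 0) := by
  rw [← hA_eq_hB seatsTrans r hr0 hr6, hB, List.length_map, length_hitsIdx]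

theorem preN_eq (seatsTrans : List (List Int)) :
    preN seatsTrans = (((scannedRows seatsTrans).flatMap (hA seatsTrans)).length : Int) := by
  unfold preN
  rw [List.length_flatMap]
  rw [show (List.map (fun a => (hA seatsTrans a).length) (scannedRows seatsTrans))
      = (scannedRows seatsTrans).map
          (fun r => (((PySem.List.pyGet? seatsTrans r).getD []).take 13).countP (fun v => v ≠ 0)) from
    List.map_congr_left (fun r hr => by
      have hb := PySem.List.mem_pyRange_one.mp (scanned_subset seatsTrans r hr)
      exact length_hA seatsTrans r hb.1 hb.2)]
  exact sum_map_intCast _ _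

-- one row hit: B's in-row scan returns exactly A's k-th seat of that row
theorem cntB_hA (seatsTrans : List (List Int)) (r : Int) (g : List Int)
    (hr0 : 0 ≤ r) (hr6 : r < 6) (hrow : PySem.List.pyGet? seatsTrans r = some g) :
    cntB g = ((hA seatsTrans r).length : Int) := by
  rw [length_hA seatsTrans r hr0 hr6, hrow, cntB_eq]
  rfl

theorem rowHit (seatsTrans : List (List Int)) (r : Int) (g : List Int) (k : Int)
    (hr0 : 0 ≤ r) (hr6 : r < 6) (hrow : PySem.List.pyGet? seatsTrans r = some g)
    (h1 : 1 ≤ k) (h2 : k ≤ cntB g) :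
    (findColB g k 0).map (pairF r) = PySem.List.pyGet? (hA seatsTrans r) (k - 1) := by
  have hk2 : k ≤ (((g.take 13).countP (fun v => v ≠ 0) : Nat) : Int) := by
    rw [cntB_eq] at h2; exact h2
  have hpre : findColB g k 0 = findColB (g.take 13) k 0 := by
    conv_lhs => rw [← List.take_append_drop 13 g]
    exact findCol_prefix (g.take 13) (g.drop 13) k 0 h1 hk2
  rw [hpre, findCol_spec (g.take 13) k 0 h1 hk2,
      ← hA_eq_hB seatsTrans r hr0 hr6, hrow]
  show _ = PySem.List.pyGet? (hB r g) (k - 1)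
  rw [hB, hitsIdx, pyGet?_map _ _ _ (by omega)]

-- B's walk on an all-full row block indexes the row-major seat table
theorem walk_full (seatsTrans : List (List Int)) :
    ∀ (rs : List Int) (k : Int), (∀ r ∈ rs, 0 ≤ r ∧ r < 6) →
    (∀ r ∈ rs, rowOKb seatsTrans r = true) →
    walkB seatsTrans rs k =
      (if 1 ≤ k ∧ k ≤ ((rs.flatMap (hA seatsTrans)).length : Int)
       then PySem.List.pyGet? (rs.flatMap (hA seatsTrans)) (k - 1) else none) := by
  intro rs
  induction rs with
  | nil =>
    intro k _ _
    simp only [walkB, List.flatMap_nil, List.length_nil]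
    rw [if_neg (by omega)]
  | cons r rs ih =>
    intro k hb hok
    have hr := hb r (List.mem_cons_self ..)
    have hokr := hok r (List.mem_cons_self ..)
    obtain ⟨g, hrow⟩ : ∃ g, PySem.List.pyGet? seatsTrans r = some g := by
      cases hg : PySem.List.pyGet? seatsTrans r with
      | none => exfalso; simp [rowOKb, rowLenB, hg] at hokr
      | some g => exact ⟨g, rfl⟩
    have hcnt := cntB_hA seatsTrans r g hr.1 hr.2 hrow
    simp only [walkB, hrow, List.flatMap_cons, List.length_append]
    by_cases hg : 1 ≤ k ∧ k ≤ cntB g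
    · rw [if_pos hg, if_pos (by push_cast; omega)]
      exact (rowHit seatsTrans r g k hr.1 hr.2 hrow hg.1 hg.2).trans
        (pyGet?_append_keep _ _ _ (by omega) (by omega)).symm
    · rw [if_neg hg]
      rw [ih (k - cntB g) (fun x hx => hb x (List.mem_cons_of_mem _ hx))
            (fun x hx => hok x (List.mem_cons_of_mem _ hx))]
      have hc0 : 0 ≤ cntB g := by rw [hcnt]; positivity
      split_ifs with h1 h2 h2
      · rw [pyGet?_append_skip _ _ _ (by omega)]
        congr 1
        omega
      · exfalso; obtain ⟨hx, hy⟩ := h1; exact h2 ⟨by omega, by push_cast at hy ⊢; omega⟩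
      · exfalso
        obtain ⟨hx, hy⟩ := h2
        push_cast at hy
        by_cases hle : k ≤ cntB g
        · exact hg ⟨by omega, hle⟩
        · exact h1 ⟨by omega, by omega⟩
      · rfl

-- B's walk finds the k-th seat when it lies among the rows A scans before raising
theorem walk_early (seatsTrans : List (List Int)) :
    ∀ (rs : List Int) (k : Int), (∀ r ∈ rs, 0 ≤ r ∧ r < 6) → 1 ≤ k →
    k ≤ (((rs.takeWhile (rowOKb seatsTrans)
          ++ (rs.dropWhile (rowOKb seatsTrans)).take 1).flatMap (hA seatsTrans)).length : Int) →
    walkB seatsTrans rs k = PySem.List.pyGet?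
      ((rs.takeWhile (rowOKb seatsTrans)
        ++ (rs.dropWhile (rowOKb seatsTrans)).take 1).flatMap (hA seatsTrans)) (k - 1) := by
  intro rs
  induction rs with
  | nil => intro k _ h1 h2; simp at h2; omega
  | cons r rs ih =>
    intro k hb h1 h2
    have hr := hb r (List.mem_cons_self ..)
    by_cases hok : rowOKb seatsTrans r = true
    · rw [List.takeWhile_cons_of_pos hok, List.dropWhile_cons_of_pos hok] at h2 ⊢
      simp only [List.cons_append, List.flatMap_cons, List.length_append] at h2 ⊢
      obtain ⟨g, hrow⟩ : ∃ g, PySem.List.pyGet? seatsTrans r = some g := by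
        cases hg : PySem.List.pyGet? seatsTrans r with
        | none => exfalso; simp [rowOKb, rowLenB, hg] at hok
        | some g => exact ⟨g, rfl⟩
      have hcnt := cntB_hA seatsTrans r g hr.1 hr.2 hrow
      simp only [walkB, hrow]
      by_cases hg : 1 ≤ k ∧ k ≤ cntB g
      · rw [if_pos hg]
        exact (rowHit seatsTrans r g k hr.1 hr.2 hrow hg.1 hg.2).trans
          (pyGet?_append_keep _ _ _ (by omega) (by rw [← hcnt]; omega)).symm
      · rw [if_neg hg]
        have hlt : cntB g < k := by
          by_contra hle
          exact hg ⟨h1, by omega⟩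
        rw [ih (k - cntB g) (fun x hx => hb x (List.mem_cons_of_mem _ hx)) (by omega)
              (by push_cast at h2 ⊢; omega)]
        rw [pyGet?_append_skip _ _ _ (by omega)]
        congr 1
        omega
    · rw [List.takeWhile_cons_of_neg (by simpa using hok),
          List.dropWhile_cons_of_neg (by simpa using hok)] at h2 ⊢
      simp only [List.nil_append, List.take_succ_cons, List.take_zero, List.flatMap_cons,
        List.flatMap_nil, List.append_nil] at h2 ⊢
      cases hrow : PySem.List.pyGet? seatsTrans r with
      | none =>
        exfalso
        rw [hA_nil seatsTrans r hrow] at h2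
        simp at h2
        omega
      | some g =>
        have hcnt := cntB_hA seatsTrans r g hr.1 hr.2 hrow
        simp only [walkB, hrow]
        rw [if_pos ⟨h1, by omega⟩]
        exact rowHit seatsTrans r g k hr.1 hr.2 hrow h1 (by omega)

-- ===== VERDICT (by name: the statement is the Claim_ definition above) =====
theorem books_spec : Claim_equal_books := by
  intro booked seatsTrans _ hpre
  unfold Spec_books
  show books booked seatsTrans = books_alt booked seatsTrans
  unfold books books_alt
  rw [outer2]
  have hbnds : ∀ r ∈ PySem.List.pyRange 0 6 1, 0 ≤ r ∧ r < 6 :=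
    fun r hr => PySem.List.mem_pyRange_one.mp hr
  rw [show (PySem.List.pyRange 0 6 1).takeWhile (rowOKb seatsTrans)
        ++ ((PySem.List.pyRange 0 6 1).dropWhile (rowOKb seatsTrans)).take 1
      = scannedRows seatsTrans from rfl]
  rcases hpre with hfull | ⟨h1, h2⟩
  · -- full grid: nothing is dropped, the scanned rows are all six rows
    have hdw : (PySem.List.pyRange 0 6 1).dropWhile (rowOKb seatsTrans) = [] :=
      List.dropWhile_eq_nil_iff.mpr (fun x hx => hfull x hx)
    have htw : (PySem.List.pyRange 0 6 1).takeWhile (rowOKb seatsTrans)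
        = PySem.List.pyRange 0 6 1 :=
      List.takeWhile_eq_self_iff.mpr (fun x hx => hfull x hx)
    have hscan : scannedRows seatsTrans = PySem.List.pyRange 0 6 1 := by
      unfold scannedRows
      rw [hdw, htw, List.take_nil, List.append_nil]
    rw [hscan, walk_full seatsTrans (PySem.List.pyRange 0 6 1) booked hbnds hfull]
  · -- early return: the booked-th seat lies among the rows A scans before raising
    rw [preN_eq] at h2
    rw [if_pos ⟨h1, h2⟩,
        walk_early seatsTrans (PySem.List.pyRange 0 6 1) booked hbnds h1 h2]
    rfl
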